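-- pv_equiv track=rewrite | github.com/dhanush131204/final-year-project-crime | crime/utils/dna_logic.py | decode_from_dna
-- ===== SOURCE A (Python) =====
-- def decode_from_dna(dna):
--     """
--     Simulated DNA decoding.
--     """
--     dna_map = {'A': '00', 'C': '01', 'G': '10', 'T': '11'}
--     binary = ''.join(dna_map[base] for base in dna)
--     chars = []
--     for i in range(0, len(binary), 8):
--         byte = binary[i:i+8]
--         if len(byte) == 8:
--             chars.append(chr(int(byte, 2)))
--     return ''.join(chars)
-- ===== SOURCE B (Python) =====
-- def decode_from_dna(dna):
--     """
--     Simulated DNA decoding.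
--     """
--     value_map = {'A': 0, 'C': 1, 'G': 2, 'T': 3}
--     vals = [value_map[base] for base in dna]
--
--     def pack(vs):
--         if len(vs) < 4:
--             return ''
--         byte = vs[0] * 64 + vs[1] * 16 + vs[2] * 4 + vs[3]
--         return chr(byte) + pack(vs[4:])
--
--     return pack(vals)
-- ===== Notes on version B (the rewrite author's own statement) =====
-- stated objective: alternative
-- what changed: B replaces A's intermediate bit-string (two-bit strings joined, then re-parsed eight characters at a time with int(byte,2)) by mapping each base to a 2-bit integer and packing each group of four values arithmetically into one byte by recursion, never building or parsing a binary string.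
import Mathlib
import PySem

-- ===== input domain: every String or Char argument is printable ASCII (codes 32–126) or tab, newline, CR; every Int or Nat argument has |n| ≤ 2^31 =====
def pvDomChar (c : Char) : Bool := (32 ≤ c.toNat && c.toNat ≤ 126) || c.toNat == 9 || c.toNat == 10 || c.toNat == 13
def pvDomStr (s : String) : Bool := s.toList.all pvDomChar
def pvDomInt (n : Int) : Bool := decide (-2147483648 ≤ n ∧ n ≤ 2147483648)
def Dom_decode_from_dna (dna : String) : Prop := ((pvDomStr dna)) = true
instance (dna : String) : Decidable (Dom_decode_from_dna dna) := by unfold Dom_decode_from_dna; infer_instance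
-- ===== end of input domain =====

-- B packs each group of four 2-bit base values into a byte arithmetically by recursion,
-- instead of A's join-into-a-bit-string-and-reparse; same cost, different decomposition (objective: alternative).


-- ===== PORT A =====
-- dna_map: base -> its two-bit string
def dnaMapA : PySem.Dict Char String :=
  (((PySem.Dict.empty.insert 'A' "00").insert 'C' "01").insert 'G' "10").insert 'T' "11"

-- int(byte, 2): hand port, exact for strings of '0'/'1' only (guaranteed under Pre_)
def binVal (s : List Char) : Nat :=
  s.foldl (fun a c => 2 * a + (if c = '1' then 1 else 0)) 0

def decode_from_dna (dna : String) : String :=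
  -- binary = ''.join(dna_map[base] for base in dna); dict lookup raises KeyError outside Pre_, ported with getD ""
  let binary : List Char := dna.toList.flatMap (fun base => (dnaMapA.getD base "").toList)
  let chars : List Char :=
    (PySem.List.pyRange 0 (binary.length : Int) 8).foldl
      (fun acc i =>
        let byte := PySem.List.slice binary (some i) (some (i + 8))
        if byte.length = 8 then acc ++ [Char.ofNat (binVal byte)] else acc) []
  String.mk chars

-- ===== PORT B =====
-- value_map: base -> its two-bit value
def valMapB : PySem.Dict Char Int :=
  (((PySem.Dict.empty.insert 'A' (0 : Int)).insert 'C' 1).insert 'G' 2).insert 'T' 3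

-- def pack(vs): …  recursion in groups of four values
def packB : List Int → List Char
  | v0 :: v1 :: v2 :: v3 :: rest =>
      Char.ofNat (v0 * 64 + v1 * 16 + v2 * 4 + v3).toNat :: packB rest
  | _ => []

def decode_from_dna_alt (dna : String) : String :=
  String.mk (packB (dna.toList.map (fun base => valMapB.getD base 0)))

-- ===== PRECONDITION & SPEC =====
-- Pre_: every character is one of A/C/G/T; on any other character Python A raises KeyError.
def Pre_decode_from_dna (dna : String) : Prop :=
  (dna.toList.all (fun c => c = 'A' || c = 'C' || c = 'G' || c = 'T')) = true
instance (dna : String) : Decidable (Pre_decode_from_dna dna) := by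
  unfold Pre_decode_from_dna; infer_instance

def pvWitness_decode_from_dna : String := "ACGTT"

def Spec_decode_from_dna (dna : String) (out : String) : Prop := out = decode_from_dna_alt dna
instance (dna : String) (out : String) : Decidable (Spec_decode_from_dna dna out) := by
  unfold Spec_decode_from_dna; infer_instance

-- ===== CLAIM (what is proved, stated in full; the proofs are below) =====
def Claim_equal_decode_from_dna : Prop :=
  ∀ (dna : String), Dom_decode_from_dna dna → Pre_decode_from_dna dna →
    Spec_decode_from_dna dna (decode_from_dna dna)

-- ===== LEMMAS AND PROOFS =====

-- the 2-bit string A looks up for a base, as a char list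
def bitsOf (c : Char) : List Char := (dnaMapA.getD c "").toList
-- the 2-bit value B looks up for a base
def valOf (c : Char) : Int := valMapB.getD c 0

-- A's loop, characterised: take 8 binary chars at a time
def chunk8 : List Char → List Char
  | b0 :: b1 :: b2 :: b3 :: b4 :: b5 :: b6 :: b7 :: rest =>
      Char.ofNat (binVal [b0, b1, b2, b3, b4, b5, b6, b7]) :: chunk8 rest
  | _ => []

lemma chunk8_short (s : List Char) (h : s.length < 8) : chunk8 s = [] := by
  match s, h with
  | [], _ => rfl
  | [_], _ => rfl
  | [_, _], _ => rfl
  | [_, _, _], _ => rfl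
  | [_, _, _, _], _ => rfl
  | [_, _, _, _, _], _ => rfl
  | [_, _, _, _, _, _], _ => rfl
  | [_, _, _, _, _, _, _], _ => rfl
  | _ :: _ :: _ :: _ :: _ :: _ :: _ :: _ :: _, h => simp at h; omega

lemma chunk8_append8 (s t : List Char) (h : s.length = 8) :
    chunk8 (s ++ t) = Char.ofNat (binVal s) :: chunk8 t := by
  match s, h with
  | [b0, b1, b2, b3, b4, b5, b6, b7], _ => rfl

lemma binVal_foldl (t : List Char) (a : Nat) :
    t.foldl (fun a c => 2 * a + (if c = '1' then 1 else 0)) a = a * 2 ^ t.length + binVal t := by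
  induction t generalizing a with
  | nil => simp [binVal]
  | cons c t ih =>
      simp only [List.foldl_cons, binVal, List.length_cons]
      rw [ih, ih (2 * 0 + _)]
      ring

lemma binVal_append (s t : List Char) :
    binVal (s ++ t) = binVal s * 2 ^ t.length + binVal t := by
  unfold binVal
  rw [List.foldl_append, binVal_foldl]
  rfl

-- the four admitted bases: bit string has length 2 and value valOf
lemma base_facts (c : Char) (h : c = 'A' ∨ c = 'C' ∨ c = 'G' ∨ c = 'T') :
    (bitsOf c).length = 2 ∧ (binVal (bitsOf c) : Int) = valOf c ∧ 0 ≤ valOf c ∧ valOf c ≤ 3 := by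
  rcases h with h | h | h | h <;> subst h <;> exact ⟨by decide, by decide, by decide, by decide⟩

-- turn the if-append loop body into an append of a conditional singleton
lemma ite_append_singleton {β : Type} (c : Prop) [Decidable c] (acc : List β) (y : β) :
    (if c then acc ++ [y] else acc) = acc ++ (if c then [y] else []) := by
  split_ifs <;> simp

-- A's loop equals chunk8
lemma flatMap_chunks (bin : List Char) (n m : Nat) (hn : bin.length = n) (hm : (n + 7) / 8 = m) :
    (List.range m).flatMap
      (fun k => if ((bin.drop (8 * k)).take 8).length = 8 then
        [Char.ofNat (binVal ((bin.drop (8 * k)).take 8))] else []) = chunk8 bin := by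
  induction m generalizing bin n with
  | zero =>
      have : bin.length = 0 := by omega
      simp [List.eq_nil_of_length_eq_zero this, chunk8]
  | succ m ih =>
      by_cases h8 : 8 <= n
      · obtain ⟨s, t, hst, hs⟩ : ∃ s t, bin = s ++ t ∧ s.length = 8 :=
          ⟨bin.take 8, bin.drop 8, (List.take_append_drop 8 bin).symm, by rw [List.length_take]; omega⟩
        have ht : t.length = n - 8 := by
          subst hst; simp at hn; omega
        subst hst
        rw [chunk8_append8 s t hs, List.range_succ_eq_map]
        rw [List.flatMap_cons, List.flatMap_map]
        have h0 : List.take 8 (s ++ t) = s := by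
          rw [List.take_append_of_le_length (by omega), List.take_of_length_le (by omega)]
        have hmain : (fun k => if (((s ++ t).drop (8 * (Nat.succ k))).take 8).length = 8 then
              [Char.ofNat (binVal (((s ++ t).drop (8 * (Nat.succ k))).take 8))] else []) =
            (fun k => if ((t.drop (8 * k)).take 8).length = 8 then
              [Char.ofNat (binVal ((t.drop (8 * k)).take 8))] else []) := by
          funext k
          have hd : (s ++ t).drop (8 * Nat.succ k) = t.drop (8 * k) := by
            rw [show 8 * Nat.succ k = s.length + 8 * k by omega]
            exact List.drop_length_add_append _
          rw [hd]
        rw [hmain, ih t (n - 8) ht (by omega)]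
        simp [h0, hs]
      · have hm0 : m = 0 := by omega
        subst hm0
        have hne : ((bin.drop (8 * 0)).take 8).length ≠ 8 := by
          rw [List.length_take, List.length_drop]; omega
        simp only [Nat.zero_add, List.range_one, List.flatMap_cons, List.flatMap_nil, List.append_nil]
        rw [if_neg hne, chunk8_short bin (by omega)]

lemma loopA_eq_chunk8 (bin : List Char) :
    (PySem.List.pyRange 0 (bin.length : Int) 8).foldl
      (fun acc i =>
        let byte := PySem.List.slice bin (some i) (some (i + 8))
        if byte.length = 8 then acc ++ [Char.ofNat (binVal byte)] else acc) [] = chunk8 bin := by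
  rw [PySem.List.pyRange_of_pos 0 (bin.length : Int) (by norm_num)]
  have hcnt : (if (0 : Int) < (bin.length : Int) then
      (((bin.length : Int) - 0 + 8 - 1) / 8).toNat else 0) = (bin.length + 7) / 8 := by
    split_ifs with h <;> omega
  rw [hcnt, List.foldl_map]
  have hf : (fun (acc : List Char) (k : Nat) =>
      (fun acc i =>
        let byte := PySem.List.slice bin (some i) (some (i + 8))
        if byte.length = 8 then acc ++ [Char.ofNat (binVal byte)] else acc) acc ((0 : Int) + 8 * (k : Nat))) =
      (fun acc k => acc ++ (if ((bin.drop (8 * k)).take 8).length = 8 then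
        [Char.ofNat (binVal ((bin.drop (8 * k)).take 8))] else [])) := by
    funext acc k
    simp only [zero_add]
    rw [PySem.List.slice_toNat bin (by positivity) (by positivity),
        show ((8 * (k : Int)).toNat) = 8 * k by omega]
    rw [show ((8 * (k : Int) + 8).toNat - 8 * k) = 8 by omega]
    rw [ite_append_singleton]
  rw [hf, PySem.List.foldl_append_eq_flatMap, List.nil_append]
  exact flatMap_chunks bin bin.length ((bin.length + 7) / 8) rfl rfl

-- dummy recursion used only for its induction principle (groups of four)
def grp4 : List Char → Unit
  | _ :: _ :: _ :: _ :: rest => grp4 rest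
  | _ => ()

-- chunk8 of the concatenated bit strings equals packB of the values
lemma chunk8_flatMap (l : List Char)
    (h : ∀ c ∈ l, c = 'A' ∨ c = 'C' ∨ c = 'G' ∨ c = 'T') :
    chunk8 (l.flatMap bitsOf) = packB (l.map valOf) := by
  induction l using grp4.induct with
  | case1 a b c d rest ih =>
      obtain ⟨hla, hva, hva0, hva3⟩ := base_facts a (h a (by simp))
      obtain ⟨hlb, hvb, hvb0, hvb3⟩ := base_facts b (h b (by simp))
      obtain ⟨hlc, hvc, hvc0, hvc3⟩ := base_facts c (h c (by simp))
      obtain ⟨hld, hvd, hvd0, hvd3⟩ := base_facts d (h d (by simp))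
      have hassoc : (a :: b :: c :: d :: rest).flatMap bitsOf =
          (((bitsOf a ++ bitsOf b) ++ bitsOf c) ++ bitsOf d) ++ rest.flatMap bitsOf := by
        simp [List.flatMap_cons, List.append_assoc]
      rw [hassoc, chunk8_append8 _ _ (by simp [hla, hlb, hlc, hld]),
          List.map_cons, List.map_cons, List.map_cons, List.map_cons, packB]
      rw [ih (fun x hx => h x (by simp [hx]))]
      congr 1
      congr 1
      rw [binVal_append, binVal_append, binVal_append, hlb, hlc, hld]
      norm_num
      omega
  | case2 x hx =>
      -- l has fewer than four elements: both sides are empty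
      have hlen : x.length < 4 := by
        rcases x with _ | ⟨a, _ | ⟨b, _ | ⟨c, _ | ⟨d, rest⟩⟩⟩⟩
        · simp
        · simp
        · simp
        · simp
        · exact absurd rfl (hx a b c d rest)
      have hfl : (x.flatMap bitsOf).length < 8 := by
        have : ∀ y ∈ x, (bitsOf y).length = 2 := fun y hy => (base_facts y (h y hy)).1
        rw [List.length_flatMap]
        calc (x.map (fun y => (bitsOf y).length)).sum = (x.map (fun _ => 2)).sum := by
              congr 1; exact List.map_congr_left this
          _ = 2 * x.length := by simp [mul_comm]
          _ < 8 := by omega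
      rw [chunk8_short _ hfl]
      rcases x with _ | ⟨a, _ | ⟨b, _ | ⟨c, _ | ⟨d, rest⟩⟩⟩⟩ <;> first | rfl | (exact absurd rfl (hx a b c d rest))

-- ===== VERDICT (by name: the statement is the Claim_ definition above) =====
theorem decode_from_dna_spec : Claim_equal_decode_from_dna := by
  intro dna _ hpre
  unfold Spec_decode_from_dna decode_from_dna decode_from_dna_alt
  simp only
  rw [loopA_eq_chunk8]
  congr 1
  apply chunk8_flatMap
  intro c hc
  have := List.all_eq_true.mp hpre c hc
  simp only [Bool.or_eq_true, decide_eq_true_eq] at this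
  tauto
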